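-- pv_equiv track=rewrite | github.com/ThaiJamesLee/IR_Complex_Question_Retrieval | performance.py | get_false_negatives
-- ===== SOURCE A (Python) =====
-- def get_false_negatives(total_pred_negative, actual_doc_ids, actual_relevance):
--     """
--
--     :param total_pred_negative:
--     :param actual_doc_ids:
--     :param actual_relevance:
--     :return:
--     """
--     false_negative = 0
--     for doc, score in total_pred_negative.items():
--         try:
--             if actual_relevance[actual_doc_ids.index(doc)] > 0:
--                 false_negative += 1
--         except ValueError:
--             pass
--     return false_negative
-- ===== SOURCE B (Python) =====
-- def get_false_negatives(total_pred_negative, actual_doc_ids, actual_relevance):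
--     false_negative = 0
--     seen = set()
--     for doc, rel in zip(actual_doc_ids, actual_relevance):
--         if doc not in seen:
--             seen.add(doc)
--             if rel > 0 and doc in total_pred_negative:
--                 false_negative += 1
--     return false_negative
-- ===== Notes on version B (the rewrite author's own statement) =====
-- stated objective: faster
-- what changed: Inverts the traversal: instead of looping over the dict keys and scanning the id list with list.index per key, B makes a single pass over zip(actual_doc_ids, actual_relevance) with a seen-set, counting each doc at its first occurrence when its relevance is positive and it is a dict key.
import Mathlib
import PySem

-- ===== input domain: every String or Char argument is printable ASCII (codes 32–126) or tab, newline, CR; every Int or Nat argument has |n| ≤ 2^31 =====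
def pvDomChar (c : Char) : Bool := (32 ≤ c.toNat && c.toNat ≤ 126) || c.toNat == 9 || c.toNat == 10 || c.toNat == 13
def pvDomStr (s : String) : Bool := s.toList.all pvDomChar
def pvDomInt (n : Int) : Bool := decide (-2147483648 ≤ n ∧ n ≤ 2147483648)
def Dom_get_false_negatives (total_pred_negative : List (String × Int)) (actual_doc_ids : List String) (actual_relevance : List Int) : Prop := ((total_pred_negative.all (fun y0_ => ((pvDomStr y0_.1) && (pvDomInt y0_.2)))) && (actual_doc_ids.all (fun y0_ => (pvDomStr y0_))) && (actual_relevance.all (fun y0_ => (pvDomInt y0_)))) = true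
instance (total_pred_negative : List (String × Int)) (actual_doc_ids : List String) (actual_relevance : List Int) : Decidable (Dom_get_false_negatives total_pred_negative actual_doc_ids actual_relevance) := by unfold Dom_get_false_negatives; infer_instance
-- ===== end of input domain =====

-- B inverts the traversal: one pass over zip(actual_doc_ids, actual_relevance) with a seen-set,
-- counting each doc at its first occurrence when relevant and a key of total_pred_negative
-- (no per-key list.index scan; asymptotically fewer list scans).

-- ===== PORT A =====
-- one body of A's for-loop: ValueError from .index is caught (pass); IndexError is not (excluded by Pre_)
def pvStepA (actual_doc_ids : List String) (actual_relevance : List Int) (acc : Int) (p : String × Int) : Int :=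
  match PySem.List.index? actual_doc_ids p.1 with
  | none => acc  -- ValueError: pass
  | some i =>
    match PySem.List.pyGet? actual_relevance (i : Int) with
    | none => acc  -- IndexError: A raises here; outside Pre_
    | some r => if r > 0 then acc + 1 else acc

def get_false_negatives (total_pred_negative : List (String × Int)) (actual_doc_ids : List String) (actual_relevance : List Int) : Int :=
  total_pred_negative.foldl (pvStepA actual_doc_ids actual_relevance) 0

-- ===== PORT B =====
-- one body of B's for-loop over zip: state = (seen, false_negative);
-- 'doc in total_pred_negative' is dict-key membership, on the assoc list a key scan
def pvStepB (total_pred_negative : List (String × Int)) (st : PySem.Set String × Int) (p : String × Int) : PySem.Set String × Int :=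
  if PySem.Set.contains st.1 p.1 then st
  else (PySem.Set.add st.1 p.1,
        if 0 < p.2 ∧ total_pred_negative.any (fun q => q.1 == p.1) then st.2 + 1 else st.2)

def get_false_negatives_alt (total_pred_negative : List (String × Int)) (actual_doc_ids : List String) (actual_relevance : List Int) : Int :=
  ((actual_doc_ids.zip actual_relevance).foldl (pvStepB total_pred_negative) (PySem.Set.empty, 0)).2

-- ===== PRECONDITION & SPEC =====
-- Pre_ excludes (a) the inputs on which A raises IndexError: some predicted-negative key whose
-- first index in actual_doc_ids is >= len(actual_relevance); and (b) assoc lists with duplicate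
-- keys, which cannot arise from the Python dict total_pred_negative (duplicates collapse there,
-- so such lists represent no dict input).
def Pre_get_false_negatives (total_pred_negative : List (String × Int)) (actual_doc_ids : List String) (actual_relevance : List Int) : Prop :=
  (total_pred_negative.map (·.1)).Nodup ∧
  ∀ p ∈ total_pred_negative, ∀ i, PySem.List.index? actual_doc_ids p.1 = some i → i < actual_relevance.length
instance (total_pred_negative : List (String × Int)) (actual_doc_ids : List String) (actual_relevance : List Int) : Decidable (Pre_get_false_negatives total_pred_negative actual_doc_ids actual_relevance) := by unfold Pre_get_false_negatives; infer_instance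

def pvWitness_get_false_negatives : (List (String × Int)) × List String × List Int :=
  ([("d1", -2), ("d3", -1)], ["d1", "d2"], [1, 0])

def Spec_get_false_negatives (total_pred_negative : List (String × Int)) (actual_doc_ids : List String) (actual_relevance : List Int) (out : Int) : Prop := out = get_false_negatives_alt total_pred_negative actual_doc_ids actual_relevance
instance (total_pred_negative : List (String × Int)) (actual_doc_ids : List String) (actual_relevance : List Int) (out : Int) : Decidable (Spec_get_false_negatives total_pred_negative actual_doc_ids actual_relevance out) := by unfold Spec_get_false_negatives; infer_instance

-- ===== CLAIM =====
def Claim_equal_get_false_negatives : Prop := ∀ (total_pred_negative : List (String × Int)) (actual_doc_ids : List String) (actual_relevance : List Int), Dom_get_false_negatives total_pred_negative actual_doc_ids actual_relevance → Pre_get_false_negatives total_pred_negative actual_doc_ids actual_relevance → Spec_get_false_negatives total_pred_negative actual_doc_ids actual_relevance (get_false_negatives total_pred_negative actual_doc_ids actual_relevance)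


-- ===== LEMMAS AND PROOFS =====

-- first-match lookup in a raw pair list
def pvFirst (l : List (String × Int)) (k : String) : Option Int :=
  (l.find? (fun p => p.1 == k)).map (·.2)

-- "the key's first occurrence in actual_doc_ids is relevant", as A computes it
def pvQ (actual_doc_ids : List String) (actual_relevance : List Int) (d : String) : Bool :=
  match (PySem.List.index? actual_doc_ids d).bind (fun i => actual_relevance[i]?) with
  | some r => decide (0 < r)
  | none => false

-- the same predicate read off a pair list (will be instantiated with the zip)
def pvQL (l : List (String × Int)) (d : String) : Bool :=
  match pvFirst l d with
  | some r => decide (0 < r)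
  | none => false

theorem pvFirst_zip (ids : List String) (rel : List Int) (k : String) :
    pvFirst (ids.zip rel) k = (PySem.List.index? ids k).bind (fun i => rel[i]?) := by
  induction ids generalizing rel with
  | nil => simp [pvFirst]
  | cons x ids ih =>
    cases rel with
    | nil =>
      simp only [List.zip_nil_right, pvFirst, List.find?_nil, Option.map_none]
      cases h : PySem.List.index? (x :: ids) k with
      | none => rfl
      | some i => simp
    | cons r rel =>
      by_cases hk : x = k
      · subst hk
        rw [PySem.List.index?_cons_self]
        simp [pvFirst]
      · rw [PySem.List.index?_cons_of_ne ids hk]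
        simp only [List.zip_cons_cons, pvFirst, List.find?_cons,
          show (x == k) = false from by simp [hk]]
        rw [← pvFirst, ih]
        cases h : PySem.List.index? ids k with
        | none => rfl
        | some i => simp

theorem pvQL_zip (ids : List String) (rel : List Int) (d : String) :
    pvQL (ids.zip rel) d = pvQ ids rel d := by
  unfold pvQL pvQ; rw [pvFirst_zip]

theorem pv_contains_add_ne (s : PySem.Set String) (x y : String) (h : y ≠ x) :
    PySem.Set.contains (PySem.Set.add s x) y = PySem.Set.contains s y := by
  unfold PySem.Set.add
  split_ifs with hc
  · rfl
  · simp [PySem.Set.contains_eq_listContains]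
    exact fun e => absurd e h

theorem pvQL_cons_ne (p : String × Int) (l : List (String × Int)) (d : String) (h : p.1 ≠ d) :
    pvQL (p :: l) d = pvQL l d := by
  unfold pvQL pvFirst
  simp [show (p.1 == d) = false from by simp [h]]

-- splitting a countP over nodup-key pairs at one key
theorem pv_countP_split (tpn : List (String × Int)) (hnd : (tpn.map (·.1)).Nodup)
    (f g : String × Int → Bool) (k : String) (cond : Bool)
    (hne : ∀ q : String × Int, q.1 ≠ k → f q = g q)
    (hfk : ∀ q : String × Int, q.1 = k → f q = cond)
    (hgk : ∀ q : String × Int, q.1 = k → g q = false) :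
    (tpn.countP f : Int) =
      (if cond = true ∧ tpn.any (fun q => q.1 == k) = true then 1 else 0) + tpn.countP g := by
  induction tpn with
  | nil => simp
  | cons q rest ih =>
    simp only [List.map_cons, List.nodup_cons, List.mem_map] at hnd
    obtain ⟨hq, hrest⟩ := hnd
    simp only [List.countP_cons, List.any_cons]
    by_cases hk : q.1 = k
    · have hcong : rest.countP f = rest.countP g := by
        apply List.countP_congr
        intro p hp
        rw [hne p (fun e => hq ⟨p, hp, by rw [e, ← hk]⟩)]
      rw [hfk q hk, hgk q hk, hcong]
      simp only [show (q.1 == k) = true from by simp [hk], Bool.true_or]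
      cases cond <;> simp <;> push_cast <;> ring
    · have hb : (q.1 == k) = false := by simp [hk]
      simp only [hb, Bool.false_or, hne q hk]
      push_cast
      rw [ih hrest]
      by_cases hg : g q = true <;> simp [hg] <;> ring

-- B's loop invariant
theorem pvFoldB (tpn : List (String × Int)) (hnd : (tpn.map (·.1)).Nodup)
    (l : List (String × Int)) (seen : PySem.Set String) (count : Int) :
    (l.foldl (pvStepB tpn) (seen, count)).2
      = count + (tpn.countP (fun q => !(PySem.Set.contains seen q.1) && pvQL l q.1) : Int) := by
  induction l generalizing seen count with
  | nil =>
    have h0 : tpn.countP (fun q => !(PySem.Set.contains seen q.1) && pvQL [] q.1) = 0 := by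
      apply List.countP_eq_zero.2
      intro q _
      simp [pvQL, pvFirst]
    rw [List.foldl_nil, h0]
    simp
  | cons p rest ih =>
    simp only [List.foldl_cons, pvStepB]
    by_cases hc : PySem.Set.contains seen p.1 = true
    · rw [if_pos hc, ih seen count]
      congr 2
      apply List.countP_congr
      intro q _
      by_cases hq : p.1 = q.1
      · rw [← hq, hc]; simp
      · rw [pvQL_cons_ne p rest q.1 hq]
    · rw [if_neg hc]
      rw [ih]
      have hQself : pvQL (p :: rest) p.1 = decide (0 < p.2) := by
        unfold pvQL pvFirst
        simp
      have hsplit := pv_countP_split tpn hnd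
        (fun q => !(PySem.Set.contains seen q.1) && pvQL (p :: rest) q.1)
        (fun q => !(PySem.Set.contains (PySem.Set.add seen p.1) q.1) && pvQL rest q.1)
        p.1 (decide (0 < p.2))
        (fun q hq => by
          beta_reduce
          rw [pv_contains_add_ne seen p.1 q.1 hq, pvQL_cons_ne p rest q.1 (fun e => hq e.symm)])
        (fun q hq => by
          beta_reduce
          rw [hq, hQself]
          have hcf : PySem.Set.contains seen p.1 = false := by simpa using hc
          rw [hcf]
          simp)
        (fun q hq => by
          beta_reduce
          rw [hq]
          have : PySem.Set.contains (PySem.Set.add seen p.1) p.1 = true := by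
            rw [PySem.Set.contains_eq_listContains]
            simp [PySem.Set.mem_add (s := seen) (x := p.1) (y := p.1)]
          simp [this])
      rw [hsplit]
      by_cases hcond : 0 < p.2 ∧ tpn.any (fun q => q.1 == p.1) = true
      · rw [if_pos hcond, if_pos (by simpa using hcond)]
        ring
      · rw [if_neg hcond, if_neg (by simpa using hcond)]
        ring

-- A's loop, under the no-IndexError precondition
theorem pvFoldA (ids : List String) (rel : List Int) (l : List (String × Int))
    (hl : ∀ p ∈ l, ∀ i, PySem.List.index? ids p.1 = some i → i < rel.length) (acc : Int) :
    l.foldl (pvStepA ids rel) acc = acc + (l.countP (fun q => pvQ ids rel q.1) : Int) := by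
  induction l generalizing acc with
  | nil => simp
  | cons p rest ih =>
    have hstep : pvStepA ids rel acc p = acc + (if pvQ ids rel p.1 then 1 else 0) := by
      unfold pvStepA pvQ
      cases hi : PySem.List.index? ids p.1 with
      | none => simp
      | some i =>
        have hlt : i < rel.length := hl p (by simp) i hi
        have hget : PySem.List.pyGet? rel ((i : Nat) : Int) = some rel[i] := by
          rw [PySem.List.pyGet?_natCast]
          exact List.getElem?_eq_getElem hlt
        simp only [hget, Option.bind_some, List.getElem?_eq_getElem hlt]
        by_cases hr : (0:Int) < rel[i] <;> simp [hr]
    simp only [List.foldl_cons, List.countP_cons]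
    rw [hstep, ih (fun q hq => hl q (by simp [hq]))]
    by_cases h : pvQ ids rel p.1 = true <;> simp [h] <;> push_cast <;> ring

-- ===== VERDICT =====
theorem get_false_negatives_spec : Claim_equal_get_false_negatives := by
  intro tpn ids rel _ hpre
  unfold Spec_get_false_negatives get_false_negatives get_false_negatives_alt
  rw [pvFoldA ids rel tpn hpre.2 0, pvFoldB tpn hpre.1 (ids.zip rel) PySem.Set.empty 0]
  simp only [zero_add]
  congr 1
  apply List.countP_congr
  intro q _
  rw [pvQL_zip]
  simp [PySem.Set.empty, PySem.Set.contains]
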